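-- pv_equiv track=rewrite | github.com/mebeim/systrack | src/systrack/syscall.py | common_syscall_symbol_prefixes
-- ===== SOURCE A (Python) =====
-- from collections import Counter
-- from typing import List
--
-- def common_syscall_symbol_prefixes(names: List[str], threshold: int) -> List[str]:
-- 	'''Given a list of symbol names, find and return a list of common prefixes
-- 	of the form "xxx_" that appear in a number of symbols greater than or equal
-- 	to threshold.
--
-- 	For example, given that a bunch of syscalls in x86-64 start with __x64_sys_,
-- 	this function returns ['__x64_sys_', '__x64_', '__'].
-- 	'''
-- 	res = []
--
-- 	for l in range(max(map(len, names)), 1, -1):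
-- 		candidates = list(filter(lambda n: len(n) >= l and n[l - 1] == '_', names))
-- 		if len(candidates) < threshold:
-- 			continue
--
-- 		counts = Counter(name[:l] for name in candidates)
-- 		res.extend(filter(lambda name: counts[name] >= threshold, counts))
--
-- 	return res
-- ===== SOURCE B (Python) =====
-- def common_syscall_symbol_prefixes(names, threshold):
-- 	'''One counting pass: tally every "xxx_" prefix of every name in a single
-- 	dict (insertion order = first occurrence), then emit the qualifying
-- 	prefixes grouped by decreasing length.'''
-- 	counts = {}
-- 	maxlen = 0
-- 	for name in names:
-- 		if maxlen < len(name):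
-- 			maxlen = len(name)
-- 		for i in range(1, len(name)):
-- 			if name[i] == '_':
-- 				p = name[:i + 1]
-- 				counts[p] = counts.get(p, 0) + 1
-- 	return [p for l in range(maxlen, 1, -1)
-- 	        for p, c in counts.items() if len(p) == l and c >= threshold]
-- ===== Notes on version B (the rewrite author's own statement) =====
-- stated objective: alternative
-- what changed: A re-scans all names for every candidate length l (filter + Counter per l); B makes one pass tallying every '_'-terminated prefix of every name in a single insertion-ordered dict and then just reads the qualifying prefixes off by decreasing length.
import Mathlib
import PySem

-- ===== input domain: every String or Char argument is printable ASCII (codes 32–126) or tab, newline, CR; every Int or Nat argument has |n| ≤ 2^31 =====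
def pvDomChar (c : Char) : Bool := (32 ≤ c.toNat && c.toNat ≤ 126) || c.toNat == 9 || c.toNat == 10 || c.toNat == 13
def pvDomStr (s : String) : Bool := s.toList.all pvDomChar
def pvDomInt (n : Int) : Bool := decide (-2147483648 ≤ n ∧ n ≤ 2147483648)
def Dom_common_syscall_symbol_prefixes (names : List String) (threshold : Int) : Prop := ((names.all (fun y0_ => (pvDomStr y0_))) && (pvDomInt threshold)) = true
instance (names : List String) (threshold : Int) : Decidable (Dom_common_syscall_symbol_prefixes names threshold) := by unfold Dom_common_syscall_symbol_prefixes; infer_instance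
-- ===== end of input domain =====

-- B replaces A's per-length re-scan of all names (filter + Counter for every l) by ONE
-- counting pass tallying every '_'-terminated prefix in a single dict, then reads the
-- qualifying prefixes off grouped by decreasing length (objective: alternative one-pass tally).

-- ===== PORT A =====
def common_syscall_symbol_prefixes (names : List String) (threshold : Int) : List String :=
  match PySem.List.max? (names.map (fun n => PySem.Str.len n)) (fun x => x) with
  | none => []   -- names = []: max() raises ValueError (excluded by Pre_)
  | some m =>
    (PySem.List.pyRange m 1 (-1)).foldl (fun res l =>
      let candidates := names.filter (fun n =>
        decide (l ≤ PySem.Str.len n) && (PySem.Str.pyGet? n (l - 1) == some '_'))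
      if PySem.List.len candidates < threshold then res
      else
        let counts := PySem.Dict.counter (candidates.map (fun n => PySem.Str.slice n none (some l)))
        res ++ counts.keys.filter (fun name => decide (threshold ≤ counts.getD name 0))) []

-- ===== PORT B =====
-- inner loop of Source B: tally every prefix name[:i+1] with name[i] == '_' into d
def pvStepB (d : PySem.Dict String Int) (name : String) : PySem.Dict String Int :=
  (PySem.List.pyRange 1 (PySem.Str.len name) 1).foldl (fun d i =>
    if PySem.Str.pyGet? name i == some '_' then
      let p := PySem.Str.slice name none (some (i + 1))
      d.insert p (d.getD p 0 + 1)
    else d) d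

def common_syscall_symbol_prefixes_alt (names : List String) (threshold : Int) : List String :=
  let st := names.foldl (fun (st : PySem.Dict String Int × Int) name =>
      (pvStepB st.1 name, if st.2 < PySem.Str.len name then PySem.Str.len name else st.2))
    (PySem.Dict.empty, 0)
  (PySem.List.pyRange st.2 1 (-1)).foldl (fun res l =>
    res ++ (st.1.items.filter (fun pc =>
      decide (PySem.Str.len pc.1 = l) && decide (threshold ≤ pc.2))).map (fun pc => pc.1)) []

-- ===== PRECONDITION & SPEC =====
-- Pre_ excludes only the empty name list, on which A's max() raises ValueError.
def Pre_common_syscall_symbol_prefixes (names : List String) (threshold : Int) : Prop := names ≠ []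
instance (names : List String) (threshold : Int) : Decidable (Pre_common_syscall_symbol_prefixes names threshold) := by unfold Pre_common_syscall_symbol_prefixes; infer_instance
def pvWitness_common_syscall_symbol_prefixes : List String × Int := (["ab_cd_", "ab_x", "ab_"], 2)

def Spec_common_syscall_symbol_prefixes (names : List String) (threshold : Int) (out : List String) : Prop := out = common_syscall_symbol_prefixes_alt names threshold
instance (names : List String) (threshold : Int) (out : List String) : Decidable (Spec_common_syscall_symbol_prefixes names threshold out) := by unfold Spec_common_syscall_symbol_prefixes; infer_instance

-- ===== CLAIM (what is proved, stated in full; the proofs are below) =====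
def Claim_equal_common_syscall_symbol_prefixes : Prop := ∀ (names : List String) (threshold : Int), Dom_common_syscall_symbol_prefixes names threshold → Pre_common_syscall_symbol_prefixes names threshold → Spec_common_syscall_symbol_prefixes names threshold (common_syscall_symbol_prefixes names threshold)

-- ===== LEMMAS AND PROOFS =====

-- proof-side abbreviations for the pieces of the two programs
def pvQl (l : Int) (s : String) : Bool := decide (PySem.Str.len s = l)
def pvCand (l : Int) (n : String) : Bool :=
  decide (l ≤ PySem.Str.len n) && (PySem.Str.pyGet? n (l - 1) == some '_')
def pvTake (l : Int) (n : String) : String := PySem.Str.slice n none (some l)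
def pvIncr (d : PySem.Dict String Int) (p : String) : PySem.Dict String Int :=
  d.insert p (d.getD p 0 + 1)
-- restriction of a dict to the keys satisfying Q (here: keys of a fixed length)
def pvRst (Q : String → Bool) (d : PySem.Dict String Int) : PySem.Dict String Int :=
  PySem.Dict.mk (d.items.filter (fun pc => Q pc.1))
def pvG (name : String) (d : PySem.Dict String Int) (i : Int) : PySem.Dict String Int :=
  if PySem.Str.pyGet? name i == some '_' then
    let p := PySem.Str.slice name none (some (i + 1))
    d.insert p (d.getD p 0 + 1)
  else d
-- per-length chunk each program appends for one l
def pvChunkA (names : List String) (threshold l : Int) : List String :=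
  let candidates := names.filter (fun n =>
    decide (l ≤ PySem.Str.len n) && (PySem.Str.pyGet? n (l - 1) == some '_'))
  if PySem.List.len candidates < threshold then []
  else
    let counts := PySem.Dict.counter (candidates.map (fun n => PySem.Str.slice n none (some l)))
    counts.keys.filter (fun name => decide (threshold ≤ counts.getD name 0))
def pvChunkB (names : List String) (threshold l : Int) : List String :=
  (((names.foldl pvStepB PySem.Dict.empty).items.filter (fun pc =>
    decide (PySem.Str.len pc.1 = l) && decide (threshold ≤ pc.2))).map (fun pc => pc.1))

lemma pvStepB_eq (d : PySem.Dict String Int) (name : String) :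
    pvStepB d name = (PySem.List.pyRange 1 (PySem.Str.len name) 1).foldl (pvG name) d := rfl

lemma pv_get?_mk_filter {Q : String → Bool} (its : List (String × Int)) (k : String)
    (hQ : Q k = true) :
    (PySem.Dict.mk (its.filter (fun pc => Q pc.1))).get? k = (PySem.Dict.mk its).get? k := by
  induction its with
  | nil => rfl
  | cons a t ih =>
    obtain ⟨ak, av⟩ := a
    by_cases hQa : Q ak = true
    · simp only [List.filter_cons, hQa, if_pos]
      rw [PySem.Dict.get?_mk_cons, PySem.Dict.get?_mk_cons, ih]
    · have hne : (ak == k) = false := by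
        apply beq_eq_false_iff_ne.mpr
        intro h; subst h; exact hQa hQ
      simp only [List.filter_cons]
      rw [if_neg (by simpa using hQa)]
      rw [PySem.Dict.get?_mk_cons, hne]
      simpa using ih

lemma pv_get?_rst {Q : String → Bool} (d : PySem.Dict String Int) (k : String)
    (hQ : Q k = true) : (pvRst Q d).get? k = d.get? k := by
  obtain ⟨its⟩ := d
  exact pv_get?_mk_filter its k hQ

lemma pv_getD_rst {Q : String → Bool} (d : PySem.Dict String Int) (k : String)
    (hQ : Q k = true) : (pvRst Q d).getD k 0 = d.getD k 0 := by
  rw [PySem.Dict.getD_eq_get?_getD, PySem.Dict.getD_eq_get?_getD, pv_get?_rst d k hQ]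

lemma pv_contains_rst {Q : String → Bool} (d : PySem.Dict String Int) (k : String)
    (hQ : Q k = true) : (pvRst Q d).contains k = d.contains k := by
  rw [PySem.Dict.contains_eq_isSome_get?, PySem.Dict.contains_eq_isSome_get?, pv_get?_rst d k hQ]

lemma pv_rst_insert_true {Q : String → Bool} (d : PySem.Dict String Int) (k : String) (v : Int)
    (hQ : Q k = true) : pvRst Q (d.insert k v) = (pvRst Q d).insert k v := by
  apply PySem.Dict.ext
  by_cases hc : d.contains k = true
  · have hc' : (pvRst Q d).contains k = true := by rw [pv_contains_rst d k hQ]; exact hc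
    show ((d.insert k v).items.filter (fun pc => Q pc.1)) = _
    rw [PySem.Dict.items_insert_of_contains d v hc,
        PySem.Dict.items_insert_of_contains (pvRst Q d) v hc']
    show _ = List.map _ (d.items.filter (fun pc => Q pc.1))
    rw [List.filter_map]
    congr 1
    apply List.filter_congr
    intro p _
    by_cases hp : (p.1 == k) = true
    · simp only [Function.comp, hp, if_pos]
      have : p.1 = k := by exact eq_of_beq hp
      simp [this, hQ]
    · simp only [Function.comp]
      rw [if_neg (by simpa using hp)]
  · have hc' : (pvRst Q d).contains k = false := by
      rw [pv_contains_rst d k hQ]; simpa using hc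
    show ((d.insert k v).items.filter (fun pc => Q pc.1)) = _
    rw [PySem.Dict.items_insert_of_not_contains d v (by simpa using hc),
        PySem.Dict.items_insert_of_not_contains (pvRst Q d) v hc']
    rw [List.filter_append]
    simp [hQ, pvRst]

lemma pv_rst_insert_false {Q : String → Bool} (d : PySem.Dict String Int) (k : String) (v : Int)
    (hQ : Q k = false) : pvRst Q (d.insert k v) = pvRst Q d := by
  apply PySem.Dict.ext
  by_cases hc : d.contains k = true
  · show ((d.insert k v).items.filter (fun pc => Q pc.1)) = _
    rw [PySem.Dict.items_insert_of_contains d v hc]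
    rw [List.filter_map]
    have h1 : (d.items.filter (Function.comp (fun pc => Q pc.1)
        (fun p => if (p.1 == k) = true then (k, v) else p))) =
        d.items.filter (fun pc => Q pc.1) := by
      apply List.filter_congr
      intro p _
      by_cases hp : (p.1 == k) = true
      · have : p.1 = k := eq_of_beq hp
        simp only [Function.comp, hp, if_pos]
        simp [this, hQ]
      · simp only [Function.comp]
        rw [if_neg (by simpa using hp)]
    rw [h1]
    show List.map _ _ = (pvRst Q d).items
    have h2 : ∀ p ∈ d.items.filter (fun pc => Q pc.1),
        (if (p.1 == k) = true then (k, v) else p) = p := by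
      intro p hp
      have hQp : Q p.1 = true := by
        have := List.of_mem_filter hp
        simpa using this
      rw [if_neg]
      intro hbeq
      have : p.1 = k := eq_of_beq hbeq
      rw [this, hQ] at hQp
      exact Bool.false_ne_true hQp
    rw [List.map_congr_left h2]
    show List.map id _ = _
    rw [List.map_id]
    rfl
  · show ((d.insert k v).items.filter (fun pc => Q pc.1)) = _
    rw [PySem.Dict.items_insert_of_not_contains d v (by simpa using hc), List.filter_append]
    simp [hQ, pvRst]

lemma pv_rst_incr_true {Q : String → Bool} (d : PySem.Dict String Int) (p : String)
    (hQ : Q p = true) : pvRst Q (pvIncr d p) = pvIncr (pvRst Q d) p := by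
  unfold pvIncr
  rw [pv_rst_insert_true d p _ hQ, pv_getD_rst d p hQ]

lemma pv_len_take (n : String) (b : Int) (h0 : 0 ≤ b) (hb : b ≤ PySem.Str.len n) :
    PySem.Str.len (PySem.Str.slice n none (some b)) = b := by
  have h1 : (PySem.Str.slice n none (some b)).toList = n.toList.take b.toNat := by
    rw [PySem.Str.toList_slice, PySem.Chars.slice_eq_listSlice]
    exact PySem.List.slice_to n.toList h0
  rw [PySem.Str.len_eq, h1, List.length_take]
  rw [PySem.Str.len_eq] at hb
  omega

lemma pvAux (name : String) (l : Int) (hl : 2 ≤ l) (k : Nat) :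
    ∀ (a : Int), 1 ≤ a → (PySem.Str.len name - a).toNat = k →
    ∀ d, pvRst (pvQl l) ((PySem.List.pyRange a (PySem.Str.len name) 1).foldl (pvG name) d) =
      if a ≤ l - 1 ∧ l ≤ PySem.Str.len name ∧ (PySem.Str.pyGet? name (l - 1) == some '_') = true
      then pvIncr (pvRst (pvQl l) d) (PySem.Str.slice name none (some l))
      else pvRst (pvQl l) d := by
  induction k with
  | zero =>
    intro a ha hk d
    have hLa : PySem.Str.len name ≤ a := by omega
    rw [PySem.List.pyRange_one_eq_nil hLa, List.foldl_nil, if_neg]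
    rintro ⟨h1, h2, _⟩
    omega
  | succ k ih =>
    intro a ha hk d
    have haL : a < PySem.Str.len name := by omega
    rw [PySem.List.pyRange_one_cons haL, List.foldl_cons]
    by_cases hch : (PySem.Str.pyGet? name a == some '_') = true
    · have hg : pvG name d a =
          pvIncr d (PySem.Str.slice name none (some (a + 1))) := by
        unfold pvG
        rw [if_pos hch]
        rfl
      rw [hg, ih (a + 1) (by omega) (by omega)]
      by_cases hal : a = l - 1
      · have hll : a + 1 = l := by omega
        rw [if_neg (by rintro ⟨h1, _, _⟩; omega)]
        rw [hll]
        have hQ : pvQl l (PySem.Str.slice name none (some l)) = true := by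
          simp only [pvQl]
          rw [pv_len_take name l (by omega) (by omega)]
          simp
        rw [pv_rst_incr_true _ _ hQ]
        rw [if_pos ⟨by omega, by omega, by rw [← hal]; exact hch⟩]
      · have hQ : pvQl l (PySem.Str.slice name none (some (a + 1))) = false := by
          simp only [pvQl]
          rw [pv_len_take name (a + 1) (by omega) (by omega)]
          simp; omega
        have hrst : pvRst (pvQl l) (pvIncr d (PySem.Str.slice name none (some (a + 1)))) =
            pvRst (pvQl l) d := by
          unfold pvIncr
          exact pv_rst_insert_false d _ _ hQ
        rw [hrst]
        have hiff : (a + 1 ≤ l - 1 ∧ l ≤ PySem.Str.len name ∧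
            (PySem.Str.pyGet? name (l - 1) == some '_') = true) ↔
            (a ≤ l - 1 ∧ l ≤ PySem.Str.len name ∧
            (PySem.Str.pyGet? name (l - 1) == some '_') = true) := by
          constructor
          · rintro ⟨h1, h2, h3⟩; exact ⟨by omega, h2, h3⟩
          · rintro ⟨h1, h2, h3⟩; exact ⟨by omega, h2, h3⟩
        rw [if_congr hiff rfl rfl]
    · have hg : pvG name d a = d := by
        unfold pvG
        rw [if_neg hch]
      rw [hg, ih (a + 1) (by omega) (by omega)]
      have hiff : (a + 1 ≤ l - 1 ∧ l ≤ PySem.Str.len name ∧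
          (PySem.Str.pyGet? name (l - 1) == some '_') = true) ↔
          (a ≤ l - 1 ∧ l ≤ PySem.Str.len name ∧
          (PySem.Str.pyGet? name (l - 1) == some '_') = true) := by
        constructor
        · rintro ⟨h1, h2, h3⟩; exact ⟨by omega, h2, h3⟩
        · rintro ⟨h1, h2, h3⟩
          have hne : a ≠ l - 1 := by
            intro h; rw [h] at hch; exact hch h3
          exact ⟨by omega, h2, h3⟩
      rw [if_congr hiff rfl rfl]

lemma pvStepOne (d : PySem.Dict String Int) (name : String) (l : Int) (hl : 2 ≤ l) :
    pvRst (pvQl l) (pvStepB d name) =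
    if pvCand l name = true then pvIncr (pvRst (pvQl l) d) (pvTake l name)
    else pvRst (pvQl l) d := by
  rw [pvStepB_eq, pvAux name l hl (PySem.Str.len name - 1).toNat 1 (by omega) rfl d]
  have hiff : (1 ≤ l - 1 ∧ l ≤ PySem.Str.len name ∧
      (PySem.Str.pyGet? name (l - 1) == some '_') = true) ↔ (pvCand l name = true) := by
    simp only [pvCand, Bool.and_eq_true, decide_eq_true_eq]
    constructor
    · rintro ⟨_, h2, h3⟩; exact ⟨h2, h3⟩
    · rintro ⟨h2, h3⟩; exact ⟨by omega, h2, h3⟩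
  rw [if_congr hiff rfl rfl]
  rfl

lemma pvMain (names : List String) (l : Int) (hl : 2 ≤ l) :
    ∀ d, pvRst (pvQl l) (names.foldl pvStepB d) =
      ((names.filter (pvCand l)).map (pvTake l)).foldl pvIncr (pvRst (pvQl l) d) := by
  induction names with
  | nil => intro d; simp
  | cons n t ih =>
    intro d
    simp only [List.foldl_cons, List.filter_cons]
    rw [ih (pvStepB d n), pvStepOne d n l hl]
    by_cases hc : pvCand l n = true
    · rw [if_pos hc, if_pos hc, List.map_cons, List.foldl_cons]
    · rw [if_neg hc, if_neg hc]

lemma pvCounts (names : List String) (l : Int) (hl : 2 ≤ l) :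
    pvRst (pvQl l) (names.foldl pvStepB PySem.Dict.empty) =
      PySem.Dict.counter ((names.filter (pvCand l)).map (pvTake l)) := by
  rw [pvMain names l hl]
  have h0 : pvRst (pvQl l) PySem.Dict.empty = PySem.Dict.empty := rfl
  rw [h0]
  exact PySem.Dict.foldl_insert_getD_add_one_eq_counter _

lemma pv_filter_map_pairs (S : List String) (c : String → Int) (t : Int) :
    ((S.map (fun k => (k, c k))).filter (fun pc => decide (t ≤ pc.2))).map (fun pc => pc.1) =
    S.filter (fun k => decide (t ≤ c k)) := by
  induction S with
  | nil => rfl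
  | cons a s ih =>
    by_cases h : t ≤ c a
    · simp [h, ih]
    · simp [h, ih]

lemma pvChunk (names : List String) (threshold l : Int) (hl : 2 ≤ l) :
    pvChunkA names threshold l = pvChunkB names threshold l := by
  simp only [pvChunkA, pvChunkB]
  have hxs : names.filter (fun n =>
      decide (l ≤ PySem.Str.len n) && (PySem.Str.pyGet? n (l - 1) == some '_')) =
      names.filter (pvCand l) := rfl
  rw [hxs]
  set xs := (names.filter (pvCand l)).map (pvTake l) with hxsdef
  have hmapeq : (names.filter (pvCand l)).map (fun n => PySem.Str.slice n none (some l)) = xs := rfl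
  rw [hmapeq]
  -- right side: restrict the one-pass dict to length-l keys, then it IS counter xs
  have hfilt : ((names.foldl pvStepB PySem.Dict.empty).items.filter (fun pc =>
      decide (PySem.Str.len pc.1 = l) && decide (threshold ≤ pc.2))) =
      ((PySem.Dict.counter xs).items.filter (fun pc => decide (threshold ≤ pc.2))) := by
    have h1 : ((names.foldl pvStepB PySem.Dict.empty).items.filter (fun pc =>
        decide (PySem.Str.len pc.1 = l) && decide (threshold ≤ pc.2))) =
        (((names.foldl pvStepB PySem.Dict.empty).items.filter (fun pc =>
          pvQl l pc.1)).filter (fun pc => decide (threshold ≤ pc.2))) := by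
      rw [List.filter_filter]
      apply List.filter_congr
      intro p _
      simp [pvQl, Bool.and_comm]
    rw [h1]
    have h2 : ((names.foldl pvStepB PySem.Dict.empty).items.filter (fun pc => pvQl l pc.1)) =
        (PySem.Dict.counter xs).items := by
      have := pvCounts names l hl
      have h3 : (pvRst (pvQl l) (names.foldl pvStepB PySem.Dict.empty)).items =
          (PySem.Dict.counter xs).items := by rw [this]
      exact h3
    rw [h2]
  rw [hfilt]
  rw [PySem.Dict.items_counter]
  rw [pv_filter_map_pairs]
  -- left side
  by_cases hth : PySem.List.len (names.filter (pvCand l)) < threshold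
  · rw [if_pos hth]
    symm
    rw [List.filter_eq_nil_iff]
    intro k _
    have hcnt : (xs.count k : Int) ≤ (xs.length : Int) := by
      exact_mod_cast List.count_le_length
    have hlen : (xs.length : Int) = PySem.List.len (names.filter (pvCand l)) := by
      rw [hxsdef, List.length_map, PySem.List.len_eq]
    simp only [decide_eq_true_eq]
    omega
  · rw [if_neg hth]
    rw [PySem.Dict.keys_counter]
    apply List.filter_congr
    intro k _
    rw [PySem.Dict.getD_counter]

lemma pvMaxFold (ys : List String) (a : Int) :
    ys.foldl (fun m nm => if m < PySem.Str.len nm then PySem.Str.len nm else m) a =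
    (ys.map PySem.Str.len).foldl max a := by
  rw [List.foldl_map]
  apply PySem.List.foldl_congr_mem
  intro acc x _
  by_cases hx : acc < PySem.Str.len x
  · rw [if_pos hx, max_eq_right hx.le]
  · rw [if_neg hx, max_eq_left (not_lt.mp hx)]

-- ===== VERDICT (by name: the statement is the Claim_ definition above) =====
theorem common_syscall_symbol_prefixes_spec : Claim_equal_common_syscall_symbol_prefixes := by
  intro names threshold _hdom hpre
  unfold Spec_common_syscall_symbol_prefixes
  obtain ⟨n, t, rfl⟩ := List.exists_cons_of_ne_nil hpre
  unfold common_syscall_symbol_prefixes common_syscall_symbol_prefixes_alt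
  rw [List.map_cons, PySem.List.max?_id_cons]
  rw [PySem.List.foldl_prod_mk (f := fun d name => pvStepB d name)
      (g := fun m name => if m < PySem.Str.len name then PySem.Str.len name else m)]
  simp only []
  -- the running maximum in B equals A's max()
  have hmax : (n :: t).foldl (fun m nm => if m < PySem.Str.len nm then PySem.Str.len nm else m) 0 =
      (t.map PySem.Str.len).foldl max (PySem.Str.len n) := by
    rw [List.foldl_cons, pvMaxFold]
    have h0 : (0 : Int) ≤ PySem.Str.len n := by rw [PySem.Str.len_eq]; positivity
    congr 1
    by_cases hn : (0 : Int) < PySem.Str.len n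
    · rw [if_pos hn]
    · rw [if_neg hn]; omega
  rw [hmax]
  -- both loops append one chunk per l; turn them into flatMaps and compare chunks
  have hA : ∀ (M : Int), (PySem.List.pyRange M 1 (-1)).foldl (fun res l =>
      let candidates := (n :: t).filter (fun nm =>
        decide (l ≤ PySem.Str.len nm) && (PySem.Str.pyGet? nm (l - 1) == some '_'))
      if PySem.List.len candidates < threshold then res
      else
        let counts := PySem.Dict.counter (candidates.map (fun nm => PySem.Str.slice nm none (some l)))
        res ++ counts.keys.filter (fun name => decide (threshold ≤ counts.getD name 0))) [] =
      (PySem.List.pyRange M 1 (-1)).flatMap (fun l => pvChunkA (n :: t) threshold l) := by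
    intro M
    rw [PySem.List.foldl_congr_mem _ _ (fun res l => res ++ pvChunkA (n :: t) threshold l) _ ?_]
    · rw [PySem.List.foldl_append_eq_flatMap, List.nil_append]
    · intro acc l _
      unfold pvChunkA
      by_cases hth : PySem.List.len ((n :: t).filter (fun nm =>
          decide (l ≤ PySem.Str.len nm) && (PySem.Str.pyGet? nm (l - 1) == some '_'))) < threshold
      · simp only [hth, if_pos, List.append_nil]
      · simp only [hth, ite_false]
  have hB : ∀ (M : Int), (PySem.List.pyRange M 1 (-1)).foldl (fun res l =>
      res ++ ((((n :: t).foldl (fun d name => pvStepB d name) PySem.Dict.empty).items.filter (fun pc =>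
        decide (PySem.Str.len pc.1 = l) && decide (threshold ≤ pc.2))).map (fun pc => pc.1))) [] =
      (PySem.List.pyRange M 1 (-1)).flatMap (fun l => pvChunkB (n :: t) threshold l) := by
    intro M
    rw [PySem.List.foldl_append_eq_flatMap]
    rfl
  rw [hA, hB]
  apply List.flatMap_congr
  intro l hl
  have h2l : 2 ≤ l := by
    have := PySem.List.mem_pyRange_neg_one.mp hl
    omega
  exact pvChunk (n :: t) threshold l h2l
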